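-- pv_equiv track=rewrite | github.com/GroupLe/grouple-face-tagger | models/NER/reproduce/markup_data.py | split_pairings
-- ===== SOURCE A (Python) =====
-- def split_pairings(text):
--     s = text[0]
--     for i, c in enumerate(text[1:], start=1):
--         prev = text[i-1]
--         if c.isalpha() and prev.isalpha():
--             if c.isupper() and not prev.isupper():
--                 s += ' '
--         s += c
--     return s
-- ===== SOURCE B (Python) =====
-- def split_pairings(text):
--     # Stage 1: collect the boundary positions where a word break goes
--     # (uppercase letter right after a non-upper letter); stage 2: slice
--     # the text at those boundaries and join the segments with spaces.
--     cuts = [i for i in range(1, len(text))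
--             if text[i].isalpha() and text[i].isupper()
--             and text[i - 1].isalpha() and not text[i - 1].isupper()]
--     bounds = [0] + cuts + [len(text)]
--     return ' '.join(text[a:b] for a, b in zip(bounds, bounds[1:]))
-- ===== Notes on version B (the rewrite author's own statement) =====
-- stated objective: alternative
-- what changed: Instead of A's char-by-char accumulation loop with index lookups, B first computes the list of break positions, then slices the text at those positions and joins the segments with a space separator.
import Mathlib
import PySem

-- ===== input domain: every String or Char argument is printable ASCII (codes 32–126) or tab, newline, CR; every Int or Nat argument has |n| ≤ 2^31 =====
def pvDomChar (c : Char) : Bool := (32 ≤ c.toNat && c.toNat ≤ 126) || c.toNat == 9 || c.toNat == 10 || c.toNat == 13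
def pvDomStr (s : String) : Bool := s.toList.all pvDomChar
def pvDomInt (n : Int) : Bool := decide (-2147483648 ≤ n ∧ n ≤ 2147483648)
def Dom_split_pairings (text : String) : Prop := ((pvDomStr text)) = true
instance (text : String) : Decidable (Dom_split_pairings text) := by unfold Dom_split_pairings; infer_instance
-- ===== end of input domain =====

-- B computes the list of break positions first and then slices the text at those
-- positions and joins the segments with spaces, instead of A's char-by-char
-- accumulation loop; on the empty string A raises IndexError (excluded by Pre_) while B returns the empty string.

-- ===== PORT A =====
def split_pairings (text : String) : String :=
  let cs := text.toList
  match cs with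
  | [] => ""  -- Python: indexing the first character raises IndexError here; excluded by Pre_
  | c0 :: _ =>
    -- s = text[0]; for i, c in enumerate(text[1:], start=1): prev = text[i-1]; …
    String.ofList ((PySem.List.enumerate (PySem.List.slice cs (some 1) none) 1).foldl
      (fun s ic =>
        match PySem.List.pyGet? cs (ic.1 - 1) with
        | none => s  -- unreachable: 1 ≤ i < len(text), so i-1 is in range
        | some prev =>
          let s := if PySem.Chars.isalpha ic.2 && PySem.Chars.isalpha prev then
                     (if PySem.Chars.isupper ic.2 && !(PySem.Chars.isupper prev)
                      then s ++ [' '] else s)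
                   else s
          s ++ [ic.2]) [c0])

-- ===== PORT B =====
-- the comprehension's condition: text[i].isalpha() and text[i].isupper()
--                            and text[i-1].isalpha() and not text[i-1].isupper()
def pvTransAt (cs : List Char) (i : Int) : Bool :=
  match PySem.List.pyGet? cs i, PySem.List.pyGet? cs (i - 1) with
  | some c, some p =>
      PySem.Chars.isalpha c && PySem.Chars.isupper c
        && PySem.Chars.isalpha p && !(PySem.Chars.isupper p)
  | _, _ => false

def split_pairings_alt (text : String) : String :=
  let cs := text.toList
  let n : Int := (cs.length : Int)
  -- cuts = [i for i in range(1, len(text)) if …]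
  let cuts : List Int := (PySem.List.pyRange 1 n 1).filter (pvTransAt cs)
  -- bounds = [0] + cuts + [len(text)]
  let bounds : List Int := 0 :: cuts ++ [n]
  -- ' '.join(text[a:b] for a, b in zip(bounds, bounds[1:]))
  String.ofList (PySem.Chars.join [' ']
    ((bounds.zip bounds.tail).map (fun ab => PySem.List.slice cs (some ab.1) (some ab.2))))

-- ===== PRECONDITION & SPEC =====
-- Pre_ excludes exactly the empty string, on which A raises IndexError indexing the first character.
def Pre_split_pairings (text : String) : Prop := text.toList ≠ []
instance (text : String) : Decidable (Pre_split_pairings text) := by unfold Pre_split_pairings; infer_instance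
def pvWitness_split_pairings : String := "helloWorld aB"
def Spec_split_pairings (text : String) (out : String) : Prop := out = split_pairings_alt text
instance (text : String) (out : String) : Decidable (Spec_split_pairings text out) := by unfold Spec_split_pairings; infer_instance

-- ===== CLAIM (what is proved, stated in full; the proofs are below) =====
def Claim_equal_split_pairings : Prop := ∀ (text : String), Dom_split_pairings text → Pre_split_pairings text → Spec_split_pairings text (split_pairings text)

-- ===== LEMMAS AND PROOFS =====

-- the space-insertion decision for one adjacent pair (prev, cur)
def pvG (pc : Char × Char) : List Char :=
  if PySem.Chars.isalpha pc.2 && PySem.Chars.isupper pc.2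
     && PySem.Chars.isalpha pc.1 && !(PySem.Chars.isupper pc.1)
  then [' ', pc.2] else [pc.2]

-- Nat-level transition test (used for 1 ≤ k only)
def pvTransN (cs : List Char) (k : Nat) : Bool :=
  match cs[k]?, cs[k-1]? with
  | some c, some p =>
      PySem.Chars.isalpha c && PySem.Chars.isupper c
        && PySem.Chars.isalpha p && !(PySem.Chars.isupper p)
  | _, _ => false

def pvCuts (cs : List Char) : List Nat := (List.range' 1 (cs.length - 1)).filter (pvTransN cs)

def pvSegs (cs : List Char) (a : Nat) : List Nat → List (List Char)
  | [] => [cs.drop a]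
  | k :: ks => ((cs.drop a).take (k - a)) :: pvSegs cs k ks

theorem pvTransAt_natCast (cs : List Char) (k : Nat) (hk : 1 ≤ k) :
    pvTransAt cs (k : Int) = pvTransN cs k := by
  unfold pvTransAt pvTransN
  have h1 : (k : Int) - 1 = ((k - 1 : Nat) : Int) := by omega
  rw [h1, PySem.List.pyGet?_natCast, PySem.List.pyGet?_natCast]

theorem pvTransN_shift (c0 : Char) (cs : List Char) (j : Nat) (hj : 1 ≤ j) :
    pvTransN (c0 :: cs) (j + 1) = pvTransN cs j := by
  unfold pvTransN
  have h1 : (c0 :: cs)[j + 1]? = cs[j]? := by simp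
  have h2 : (c0 :: cs)[j + 1 - 1]? = cs[j - 1]? := by
    have : j + 1 - 1 = (j - 1) + 1 := by omega
    rw [this]; simp
  rw [h1, h2]

theorem pvCuts_cons (c0 r0 : Char) (rs : List Char) :
    pvCuts (c0 :: r0 :: rs)
      = (if pvTransN (c0 :: r0 :: rs) 1 then [1] else [])
        ++ (pvCuts (r0 :: rs)).map (· + 1) := by
  unfold pvCuts
  have hlen : (c0 :: r0 :: rs).length - 1 = ((r0 :: rs).length - 1) + 1 := by simp
  rw [hlen, List.range'_succ, List.filter_cons]
  have hsh : List.range' (1 + 1) ((r0 :: rs).length - 1)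
      = (List.range' 1 ((r0 :: rs).length - 1)).map (· + 1) := by
    rw [List.range'_eq_map_range, List.range'_eq_map_range, List.map_map]
    apply List.map_congr_left; intro x _; simp; omega
  rw [hsh, List.filter_map]
  have hcong : List.filter (pvTransN (c0 :: r0 :: rs) ∘ (· + 1)) (List.range' 1 ((r0 :: rs).length - 1))
      = List.filter (pvTransN (r0 :: rs)) (List.range' 1 ((r0 :: rs).length - 1)) := by
    apply List.filter_congr
    intro j hj
    have hj1 : 1 ≤ j := by
      simp [List.mem_range'_1] at hj
      omega
    simp [Function.comp, pvTransN_shift c0 (r0 :: rs) j hj1]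
  rw [hcong]
  split <;> simp

theorem pvSegs_shift (cs : List Char) (c0 : Char) :
    ∀ (ks : List Nat) (a : Nat),
    pvSegs (c0 :: cs) (a + 1) (ks.map (· + 1)) = pvSegs cs a ks := by
  intro ks
  induction ks with
  | nil => intro a; simp [pvSegs]
  | cons k t ih =>
    intro a
    simp only [List.map_cons, pvSegs, ih k]
    have : k + 1 - (a + 1) = k - a := by omega
    simp [this]

theorem pvJoin_cons (x y : List Char) (l : List (List Char)) :
    PySem.Chars.join [' '] (x :: y :: l) = x ++ ' ' :: PySem.Chars.join [' '] (y :: l) := by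
  simp [PySem.Chars.join, List.intercalate, List.intersperse]

theorem pvJoin_segs_shift (c0 : Char) (cs : List Char) (ks : List Nat) :
    PySem.Chars.join [' '] (pvSegs (c0 :: cs) 0 (ks.map (· + 1)))
      = c0 :: PySem.Chars.join [' '] (pvSegs cs 0 ks) := by
  cases ks with
  | nil => simp [pvSegs, PySem.Chars.join, List.intercalate]
  | cons k t =>
    simp only [List.map_cons, pvSegs]
    have h1 : pvSegs (c0 :: cs) (k + 1) (t.map (· + 1)) = pvSegs cs k t := pvSegs_shift cs c0 t k
    rw [h1]
    have h2 : ((c0 :: cs).drop 0).take (k + 1 - 0) = c0 :: (cs.drop 0).take (k - 0) := by simp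
    rw [h2]
    cases hsegs : pvSegs cs k t with
    | nil => cases t <;> simp [pvSegs] at hsegs
    | cons s ss =>
      rw [pvJoin_cons, pvJoin_cons]
      simp

-- main lemma: B's segment join equals the adjacent-pair expansion
theorem pvMain : ∀ (rest : List Char) (c0 : Char),
    PySem.Chars.join [' '] (pvSegs (c0 :: rest) 0 (pvCuts (c0 :: rest)))
      = c0 :: ((c0 :: rest).zip rest).flatMap pvG := by
  intro rest
  induction rest with
  | nil =>
    intro c0
    simp [pvCuts, pvSegs, PySem.Chars.join, List.intercalate]
  | cons r0 rs ih =>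
    intro c0
    rw [pvCuts_cons]
    have htrans : pvTransN (c0 :: r0 :: rs) 1
        = (PySem.Chars.isalpha r0 && PySem.Chars.isupper r0
           && PySem.Chars.isalpha c0 && !(PySem.Chars.isupper c0)) := by
      simp [pvTransN]
    rw [List.zip_cons_cons, List.flatMap_cons, htrans]
    by_cases hc : (PySem.Chars.isalpha r0 && PySem.Chars.isupper r0
        && PySem.Chars.isalpha c0 && !(PySem.Chars.isupper c0)) = true
    · rw [if_pos hc]
      have hstep : pvSegs (c0 :: r0 :: rs) 0 ([1] ++ (pvCuts (r0 :: rs)).map (· + 1))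
          = [c0] :: pvSegs (c0 :: r0 :: rs) 1 ((pvCuts (r0 :: rs)).map (· + 1)) := by
        simp [pvSegs]
      rw [hstep]
      have hsh : pvSegs (c0 :: r0 :: rs) (0 + 1) ((pvCuts (r0 :: rs)).map (· + 1))
          = pvSegs (r0 :: rs) 0 (pvCuts (r0 :: rs)) := pvSegs_shift (r0 :: rs) c0 _ 0
      simp only [Nat.zero_add] at hsh
      rw [hsh]
      cases hsegs : pvSegs (r0 :: rs) 0 (pvCuts (r0 :: rs)) with
      | nil => cases h' : pvCuts (r0 :: rs) <;> simp [pvSegs, h'] at hsegs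
      | cons s ss =>
        rw [pvJoin_cons]
        rw [← hsegs, ih r0]
        simp [pvG, hc]
    · rw [if_neg hc]
      rw [List.nil_append, pvJoin_segs_shift, ih r0]
      have hG : pvG (c0, r0) = [r0] := by
        simp only [pvG]
        rw [if_neg hc]
      rw [hG]
      simp

theorem pvCuts_int (cs : List Char) :
    (PySem.List.pyRange 1 (cs.length : Int) 1).filter (pvTransAt cs)
      = (pvCuts cs).map ((Nat.cast : Nat → Int)) := by
  unfold pvCuts
  rw [PySem.List.pyRange_one, List.filter_map, List.range'_eq_map_range,
    List.filter_map, List.map_map]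
  have hn : ((cs.length : Int) - 1).toNat = cs.length - 1 := by omega
  rw [hn]
  have hpred : List.filter (pvTransAt cs ∘ fun k : Nat => 1 + (k : Int)) (List.range (cs.length - 1))
      = List.filter ((pvTransN cs) ∘ fun x => 1 + x) (List.range (cs.length - 1)) := by
    apply List.filter_congr
    intro j _
    have h1 : (1 : Int) + (j : Int) = ((1 + j : Nat) : Int) := by push_cast; ring
    simp only [Function.comp]
    rw [h1, pvTransAt_natCast cs (1 + j) (by omega)]
  rw [hpred]
  apply List.map_congr_left
  intro j _
  simp only [Function.comp]
  push_cast; ring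

theorem pvSegs_bridge (cs : List Char) : ∀ (ks : List Nat) (a : Nat),
    ((((a : Int) :: ks.map ((Nat.cast : Nat → Int)) ++ [(cs.length : Int)]).zip
        (ks.map ((Nat.cast : Nat → Int)) ++ [(cs.length : Int)])).map
      (fun ab => PySem.List.slice cs (some ab.1) (some ab.2)))
      = pvSegs cs a ks := by
  intro ks
  induction ks with
  | nil =>
    intro a
    have h : (cs.drop a).take (cs.length - a) = cs.drop a := List.take_of_length_le (by simp)
    simp [pvSegs, PySem.List.slice_natCast, h]
  | cons k t ih =>
    intro a
    simp only [List.map_cons, List.cons_append, List.zip_cons_cons, pvSegs]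
    rw [PySem.List.slice_natCast]
    congr 1
    exact ih k

-- the A-side loop: accumulation with index lookups equals the adjacent-pair expansion
theorem split_pairings_loop (g : Char × Char → List Char)
    (hg : ∀ p c, (if PySem.Chars.isalpha c && PySem.Chars.isalpha p then
                     (if PySem.Chars.isupper c && !(PySem.Chars.isupper p)
                      then [' '] else ([] : List Char))
                   else []) ++ [c] = g (p, c)) :
    ∀ (post pre' : List Char) (p : Char) (acc : List Char),
    (PySem.List.enumerate post ((pre'.length : Int) + 1)).foldl
      (fun s ic =>
        match PySem.List.pyGet? (pre' ++ p :: post) (ic.1 - 1) with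
        | none => s
        | some prev =>
          (if PySem.Chars.isalpha ic.2 && PySem.Chars.isalpha prev then
             (if PySem.Chars.isupper ic.2 && !(PySem.Chars.isupper prev)
              then s ++ [' '] else s)
           else s) ++ [ic.2]) acc
    = acc ++ ((p :: post).zip post).flatMap g := by
  intro post
  induction post with
  | nil => intro pre' p acc; simp [PySem.List.enumerate]
  | cons h t ih =>
    intro pre' p acc
    rw [PySem.List.enumerate_cons, List.foldl_cons]
    have hget : PySem.List.pyGet? (pre' ++ p :: h :: t) (((pre'.length : Int) + 1) - 1)
        = some p := by
      have he : ((pre'.length : Int) + 1) - 1 = ((pre'.length : Nat) : Int) := by ring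
      rw [he, PySem.List.pyGet?_natCast]
      simp
    simp only [hget]
    have hlist : pre' ++ p :: h :: t = (pre' ++ [p]) ++ h :: t := by simp
    have hidx : ((pre'.length : Int) + 1) + 1 = (((pre' ++ [p]).length : Int) + 1) := by
      simp
    rw [hlist, hidx, ih (pre' ++ [p]) h]
    rw [List.zip_cons_cons, List.flatMap_cons, ← hg p h]
    by_cases h1 : (PySem.Chars.isalpha h && PySem.Chars.isalpha p) = true <;>
      by_cases h2 : (PySem.Chars.isupper h && !PySem.Chars.isupper p) = true <;>
      simp [h1, h2]

-- ===== VERDICT (by name: the statement is the Claim_ definition above) =====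
theorem split_pairings_spec : Claim_equal_split_pairings := by
  intro text _ hpre
  unfold Spec_split_pairings split_pairings split_pairings_alt
  cases hcs : text.toList with
  | nil => exact absurd hcs hpre
  | cons c0 rest =>
    simp only [PySem.List.slice_from_one, List.tail_cons]
    have HA := split_pairings_loop
      (g := pvG)
      (hg := by
        intro p c
        unfold pvG
        by_cases h1 : PySem.Chars.isalpha c = true <;>
          by_cases h2 : PySem.Chars.isalpha p = true <;>
          by_cases h3 : PySem.Chars.isupper c = true <;>
          by_cases h4 : PySem.Chars.isupper p = true <;>
          simp [h1, h2, h3, h4])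
      rest [] c0 [c0]
    simp only [List.length_nil, Nat.cast_zero, zero_add, List.nil_append] at HA
    rw [HA]
    rw [pvCuts_int]
    have ht : (0 :: List.map (Nat.cast : Nat → Int) (pvCuts (c0 :: rest)) ++ [(((c0 :: rest).length : Nat) : Int)]).tail
        = List.map (Nat.cast : Nat → Int) (pvCuts (c0 :: rest)) ++ [(((c0 :: rest).length : Nat) : Int)] := rfl
    rw [ht]
    have hb := pvSegs_bridge (c0 :: rest) (pvCuts (c0 :: rest)) 0
    simp only [Nat.cast_zero] at hb
    rw [hb, pvMain]
    simp
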